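-- pv_equiv track=rewrite | github.com/EricCharnesky/CIS2001-Winter2025 | MidtermReview/main.py | sum_of_prime_values_or_prime_indexes
-- ===== SOURCE A (Python) =====
-- import math
--
-- def is_prime(n):
--     if n <= 1:
--         return False
--     if n == 2:
--         return True
--     if n % 2 == 0:
--         return False
--     for i in range(3, int(math.sqrt(n)) + 1, 2):
--         if n % i == 0:
--             return False
--     return True
--
-- def sum_of_prime_values_or_prime_indexes(some_2d_list):
--     total = 0
--     current_index = 0
--     for row_index in range(len(some_2d_list)):
--         for column_index in range(len(some_2d_list[row_index])):
--             if is_prime(some_2d_list[row_index][column_index]) or is_prime(current_index):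
--                 total += some_2d_list[row_index][column_index]
--             current_index += 1
--     return total
-- ===== SOURCE B (Python) =====
-- import math
--
-- def _value_is_prime(v):
--     if v < 2:
--         return False
--     if v < 4:
--         return True
--     if v % 2 == 0:
--         return False
--     return all(v % d for d in range(3, math.isqrt(v) + 1, 2))
--
-- def sum_of_prime_values_or_prime_indexes(some_2d_list):
--     flat = [v for row in some_2d_list for v in row]
--     n = len(flat)
--     # guardless Sieve of Eratosthenes over the flat indexes
--     sieve = [i >= 2 for i in range(n)]
--     for p in range(2, n):
--         for m in range(p * p, n, p):
--             sieve[m] = False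
--     return sum(v for i, v in enumerate(flat) if sieve[i] or _value_is_prime(v))
-- ===== Notes on version B (the rewrite author's own statement) =====
-- stated objective: faster
-- what changed: B flattens the grid once and replaces A's per-index trial-division primality test with a single Sieve of Eratosthenes over the flat indexes, keeping trial division only for the cell values.
import Mathlib
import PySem

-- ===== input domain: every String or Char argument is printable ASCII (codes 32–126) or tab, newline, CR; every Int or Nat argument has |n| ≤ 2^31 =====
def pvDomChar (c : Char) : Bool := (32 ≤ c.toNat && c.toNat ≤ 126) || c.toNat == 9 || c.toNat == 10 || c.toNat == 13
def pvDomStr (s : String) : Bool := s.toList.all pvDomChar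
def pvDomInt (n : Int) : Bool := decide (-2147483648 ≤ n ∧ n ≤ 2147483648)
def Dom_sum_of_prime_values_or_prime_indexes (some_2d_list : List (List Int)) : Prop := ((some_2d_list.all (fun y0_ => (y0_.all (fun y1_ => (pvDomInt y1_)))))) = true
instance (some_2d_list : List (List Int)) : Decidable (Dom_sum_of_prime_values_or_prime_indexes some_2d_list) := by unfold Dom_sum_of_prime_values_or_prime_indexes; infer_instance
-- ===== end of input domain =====

-- B replaces A's per-index trial division with a single Sieve of Eratosthenes over the flat
-- indexes plus one pass over the flattened grid (objective: faster on grids with many elements).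

-- ===== PORT A =====
-- int(math.sqrt(n)) for n ≥ 0: exact integer square root; exact on the stated domain
-- (for 0 ≤ n ≤ 2^31 the float sqrt is accurate enough that truncation equals Nat.sqrt).
def pyIntSqrt (n : Int) : Int := ((n.toNat.sqrt : Nat) : Int)

def is_prime (n : Int) : Bool :=
  if n ≤ 1 then false
  else if n = 2 then true
  else if PySem.Int.mod n 2 == 0 then false
  else !((PySem.List.pyRange 3 (pyIntSqrt n + 1) 2).any (fun i => PySem.Int.mod n i == 0))

def sum_of_prime_values_or_prime_indexes (some_2d_list : List (List Int)) : Int :=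
  (some_2d_list.foldl
    (fun (st : Int × Int) row =>
      row.foldl
        (fun (st : Int × Int) v =>
          ((if is_prime v || is_prime st.2 then st.1 + v else st.1), st.2 + 1)) st)
    (0, 0)).1

-- ===== PORT B =====
-- _value_is_prime from Source B (math.isqrt = Nat.sqrt, exact)
def value_is_prime (v : Int) : Bool :=
  if v < 2 then false
  else if v < 4 then true
  else if PySem.Int.mod v 2 == 0 then false
  else (PySem.List.pyRange 3 (pyIntSqrt v + 1) 2).all (fun d => !(PySem.Int.mod v d == 0))

-- sieve = [i >= 2 for i in range(n)]; for p in range(2, n): for m in range(p*p, n, p): sieve[m] = False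
def mkSieve (n : Int) : List Bool :=
  (PySem.List.pyRange 2 n 1).foldl
    (fun s p => (PySem.List.pyRange (p * p) n p).foldl (fun s m => s.set m.toNat false) s)
    ((PySem.List.pyRange 0 n 1).map (fun i => decide ((2 : Int) ≤ i)))

def sum_of_prime_values_or_prime_indexes_alt (some_2d_list : List (List Int)) : Int :=
  let flat := some_2d_list.flatMap (fun row => row)
  let sieve := mkSieve (flat.length : Int)
  (((PySem.List.enumerate flat).filter
      (fun iv => PySem.List.pyGetD sieve iv.1 false || value_is_prime iv.2)).map
    (fun iv => iv.2)).sum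

-- ===== PRECONDITION & SPEC =====
def Spec_sum_of_prime_values_or_prime_indexes (some_2d_list : List (List Int)) (out : Int) : Prop := out = sum_of_prime_values_or_prime_indexes_alt some_2d_list
instance (some_2d_list : List (List Int)) (out : Int) : Decidable (Spec_sum_of_prime_values_or_prime_indexes some_2d_list out) := by unfold Spec_sum_of_prime_values_or_prime_indexes; infer_instance

-- ===== CLAIM (what is proved, stated in full; the proofs are below) =====
def Claim_equal_sum_of_prime_values_or_prime_indexes : Prop := ∀ (some_2d_list : List (List Int)), Dom_sum_of_prime_values_or_prime_indexes some_2d_list → Spec_sum_of_prime_values_or_prime_indexes some_2d_list (sum_of_prime_values_or_prime_indexes some_2d_list)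

-- ===== LEMMAS AND PROOFS =====

-- B's value test agrees with A's value test on every Int.
lemma value_is_prime_eq (v : Int) : value_is_prime v = is_prime v := by
  by_cases h2 : v < 2
  · simp [is_prime, value_is_prime, h2, show v ≤ 1 by omega]
  · by_cases h4 : v < 4
    · have hv : v = 2 ∨ v = 3 := by omega
      rcases hv with rfl | rfl
      · decide
      · have hs3 : Nat.sqrt 3 = 1 := by symm; rw [Nat.eq_sqrt]; constructor <;> decide
        simp only [is_prime, pyIntSqrt, show ((3:Int).toNat) = 3 from rfl, hs3]
        decide
    · simp only [is_prime, value_is_prime, if_neg h2, if_neg h4,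
        if_neg (show ¬ v ≤ 1 by omega), if_neg (show ¬ v = 2 by omega)]
      split_ifs with h
      · rfl
      · simp [List.all_eq_not_any_not]

-- A's trial-division test computes Nat primality on natural inputs.
lemma is_prime_natCast (i : Nat) : is_prime (i : Int) = decide (Nat.Prime i) := by
  rcases Nat.lt_or_ge i 2 with h | h
  · interval_cases i
    · simp [Nat.not_prime_zero]; decide
    · simp [Nat.not_prime_one]; decide
  rcases Nat.eq_or_lt_of_le h with h2 | h2
  · rw [← h2]
    simp [Nat.prime_two]; decide
  have h3 : 3 ≤ i := h2
  have hle : ¬ ((i:Int) ≤ 1) := by exact_mod_cast (by omega : ¬ (i ≤ 1))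
  have hne : ((i:Int) ≠ 2) := by exact_mod_cast (by omega : i ≠ 2)
  by_cases he : 2 ∣ i
  · have hmod : (PySem.Int.mod (i:Int) 2 == 0) = true := by
      simp only [beq_iff_eq, PySem.Int.mod_eq_zero_iff_dvd]
      exact_mod_cast he
    have hnp : ¬ Nat.Prime i := by
      intro hp
      rcases hp.eq_one_or_self_of_dvd 2 he with h' | h' <;> omega
    simp only [is_prime, if_neg hle, if_neg hne, hmod, if_true]
    simp [hnp]
  · have hmod : ¬ ((PySem.Int.mod (i:Int) 2 == 0) = true) := by
      simp only [beq_iff_eq, PySem.Int.mod_eq_zero_iff_dvd]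
      intro hd
      exact he (by exact_mod_cast hd)
    simp only [is_prime, if_neg hle, if_neg hne, if_neg hmod]
    have hsqrt : pyIntSqrt (i:Int) = ((Nat.sqrt i : Nat) : Int) := by
      simp [pyIntSqrt]
    have hmem : ∀ d : Int, d ∈ PySem.List.pyRange 3 (pyIntSqrt (i:Int) + 1) 2 ↔
        3 ≤ d ∧ d ≤ ((Nat.sqrt i : Nat) : Int) ∧ 2 ∣ d - 3 := by
      intro d
      rw [hsqrt, PySem.List.mem_pyRange_iff_of_pos (by norm_num)]
      omega
    by_cases hp : Nat.Prime i
    · have hany : (PySem.List.pyRange 3 (pyIntSqrt (i:Int) + 1) 2).any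
          (fun d => PySem.Int.mod (i:Int) d == 0) = false := by
        rw [List.any_eq_false]
        intro d hd
        obtain ⟨hd3, hds, -⟩ := (hmem d).mp hd
        simp only [beq_iff_eq, PySem.Int.mod_eq_zero_iff_dvd]
        intro hdvd
        have hdn : ((d.toNat : Nat) : Int) = d := Int.toNat_of_nonneg (by omega)
        have hdvd' : d.toNat ∣ i := by
          have : ((d.toNat : Nat) : Int) ∣ (i : Int) := hdn ▸ hdvd
          exact_mod_cast this
        have hdns : d.toNat ≤ Nat.sqrt i := by omega
        exact (Nat.prime_def_le_sqrt.mp hp).2 d.toNat (by omega) hdns hdvd'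
      simp [hany, hp]
    · have hany : (PySem.List.pyRange 3 (pyIntSqrt (i:Int) + 1) 2).any
          (fun d => PySem.Int.mod (i:Int) d == 0) = true := by
        rw [List.any_eq_true]
        have hm : Nat.Prime i.minFac := Nat.minFac_prime (by omega)
        have hmd : i.minFac ∣ i := Nat.minFac_dvd i
        have hm2 : i.minFac ≠ 2 := by rintro h'; exact he (h' ▸ hmd)
        have hmo : i.minFac % 2 = 1 := by
          rcases Nat.mod_two_eq_zero_or_one i.minFac with h' | h'
          · exfalso
            rcases hm.eq_one_or_self_of_dvd 2 (Nat.dvd_of_mod_eq_zero h') with h'' | h''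
            · omega
            · exact hm2 h''.symm
          · exact h'
        have hsq : i.minFac * i.minFac ≤ i := by
          have := Nat.minFac_sq_le_self (by omega) hp
          nlinarith [this]
        have hm3 : 3 ≤ i.minFac := by have := hm.two_le; omega
        refine ⟨(i.minFac : Int), ?_, ?_⟩
        · refine (hmem _).mpr ⟨by exact_mod_cast hm3, ?_, by omega⟩
          exact_mod_cast Nat.le_sqrt.mpr hsq
        · simp only [beq_iff_eq, PySem.Int.mod_eq_zero_iff_dvd]
          exact_mod_cast hmd
      simp [hany, hp]

-- length is preserved by a fold of sets
lemma foldl_set_length (L : List Int) (s : List Bool) :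
    (L.foldl (fun s m => s.set m.toNat false) s).length = s.length := by
  induction L generalizing s with
  | nil => rfl
  | cons m L ih => simp [List.foldl_cons, ih]

-- pointwise effect of one marking pass
lemma foldl_set_get (L : List Int) (s : List Bool) (i : Nat) :
    (L.foldl (fun s m => s.set m.toNat false) s)[i]? =
      if (∃ m ∈ L, m.toNat = i) ∧ i < s.length then some false else s[i]? := by
  induction L generalizing s with
  | nil => simp
  | cons m L ih =>
    rw [List.foldl_cons, ih]
    by_cases hmi : m.toNat = i
    · subst hmi
      by_cases hlen : m.toNat < s.length
      · by_cases hrest : ∃ m' ∈ L, m'.toNat = m.toNat <;>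
          simp [List.length_set, hlen, hrest]
      · simp [List.length_set, hlen]
    · simp only [List.length_set, List.getElem?_set, if_neg hmi]
      by_cases hrest : (∃ m' ∈ L, m'.toNat = i) ∧ i < s.length <;>
        simp_all [List.mem_cons]

-- pointwise effect of the whole sieve loop
lemma foldl_pass_get (P : List Int) (s : List Bool) (n : Int) (hP : ∀ p ∈ P, 2 ≤ p) (i : Nat) :
    (P.foldl (fun s p => (PySem.List.pyRange (p * p) n p).foldl
        (fun s m => s.set m.toNat false) s) s)[i]? =
      if (∃ p ∈ P, p * p ≤ (i : Int) ∧ (i : Int) < n ∧ p ∣ (i : Int)) ∧ i < s.length then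
        some false
      else s[i]? := by
  induction P generalizing s with
  | nil => simp
  | cons p P ih =>
    have hp2 : 2 ≤ p := hP p List.mem_cons_self
    rw [List.foldl_cons, ih _ (fun q hq => hP q (List.mem_cons_of_mem _ hq)),
      foldl_set_length, foldl_set_get]
    have hhead : (∃ m ∈ PySem.List.pyRange (p * p) n p, m.toNat = i) ↔
        (p * p ≤ (i : Int) ∧ (i : Int) < n ∧ p ∣ (i : Int)) := by
      constructor
      · rintro ⟨m, hm, rfl⟩
        obtain ⟨h1, h2, h3⟩ := (PySem.List.mem_pyRange_iff_of_pos (by omega) m).mp hm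
        have hm0 : ((m.toNat : Nat) : Int) = m := Int.toNat_of_nonneg (by nlinarith)
        rw [hm0]
        refine ⟨h1, h2, ?_⟩
        have : p ∣ (m - p * p) + p * p := dvd_add h3 (dvd_mul_right p p)
        simpa using this
      · rintro ⟨h1, h2, h3⟩
        refine ⟨(i : Int), ?_, by simp⟩
        refine (PySem.List.mem_pyRange_iff_of_pos (by omega) _).mpr
          ⟨h1, h2, dvd_sub h3 (dvd_mul_right p p)⟩
    by_cases hT : ∃ q ∈ P, q * q ≤ (i : Int) ∧ (i : Int) < n ∧ q ∣ (i : Int) <;>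
      by_cases hH : p * p ≤ (i : Int) ∧ (i : Int) < n ∧ p ∣ (i : Int) <;>
      by_cases h1 : i < s.length <;>
      simp [hhead, hT, hH, h1]

-- the finished sieve holds exactly Nat primality at every in-range index
lemma mkSieve_get (n i : Nat) (h : i < n) :
    (mkSieve (n : Int))[i]? = some (decide (Nat.Prime i)) := by
  unfold mkSieve
  rw [foldl_pass_get _ _ _
    (fun p hp => ((PySem.List.mem_pyRange_iff_of_pos (by norm_num) p).mp hp).1) i]
  have hlen : ((PySem.List.pyRange 0 (n:Int) 1).map (fun i => decide ((2:Int) ≤ i))).length = n := by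
    rw [PySem.List.pyRange_zero_natCast]
    simp
  have hbase : ((PySem.List.pyRange 0 (n:Int) 1).map (fun i => decide ((2:Int) ≤ i)))[i]? =
      some (decide ((i:Int) ≥ 2)) := by
    rw [PySem.List.pyRange_zero_natCast]
    simp [h, ge_iff_le]
  rw [hlen, hbase]
  rcases Nat.lt_or_ge i 2 with hi2 | hi2
  · have hcond : ¬ ∃ p ∈ PySem.List.pyRange 2 (n:Int) 1,
        p * p ≤ (i : Int) ∧ (i : Int) < n ∧ p ∣ (i : Int) := by
      rintro ⟨p, hp, h1, -, -⟩
      have := ((PySem.List.mem_pyRange_iff_of_pos (by norm_num) p).mp hp).1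
      nlinarith
    have hnp : ¬ Nat.Prime i := by interval_cases i <;> simp [Nat.not_prime_zero, Nat.not_prime_one]
    rw [if_neg (fun hc => hcond hc.1)]
    simp [hnp, show ¬ ((i:Int) ≥ 2) from by exact_mod_cast (by omega : ¬ (2 ≤ i))]
  by_cases hp : Nat.Prime i
  · have hcond : ¬ ∃ p ∈ PySem.List.pyRange 2 (n:Int) 1,
        p * p ≤ (i : Int) ∧ (i : Int) < n ∧ p ∣ (i : Int) := by
      rintro ⟨p, hp', h1, -, h3⟩
      have hp2 : 2 ≤ p := ((PySem.List.mem_pyRange_iff_of_pos (by norm_num) p).mp hp').1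
      have hq : ((p.toNat : Nat) : Int) = p := Int.toNat_of_nonneg (by omega)
      have hdvd : p.toNat ∣ i := by
        have : ((p.toNat : Nat) : Int) ∣ (i : Int) := hq ▸ h3
        exact_mod_cast this
      have hq2 : 2 ≤ p.toNat := by omega
      have hqq : p.toNat * p.toNat ≤ i := by
        have : ((p.toNat * p.toNat : Nat) : Int) ≤ (i : Int) := by push_cast; rw [hq]; exact h1
        exact_mod_cast this
      rcases hp.eq_one_or_self_of_dvd p.toNat hdvd with h' | h'
      · omega
      · nlinarith
    rw [if_neg (fun hc => hcond hc.1)]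
    simp [hp, show ((i:Int) ≥ 2) from by exact_mod_cast hi2]
  · have hm : Nat.Prime i.minFac := Nat.minFac_prime (by omega)
    have hmd : i.minFac ∣ i := Nat.minFac_dvd i
    have hsq : i.minFac * i.minFac ≤ i := by
      have := Nat.minFac_sq_le_self (by omega) hp
      nlinarith [this]
    have hm2 : 2 ≤ i.minFac := hm.two_le
    have hcond : ∃ p ∈ PySem.List.pyRange 2 (n:Int) 1,
        p * p ≤ (i : Int) ∧ (i : Int) < n ∧ p ∣ (i : Int) := by
      refine ⟨(i.minFac : Int), ?_, ?_, ?_, ?_⟩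
      · refine (PySem.List.mem_pyRange_iff_of_pos (by norm_num) _).mpr
          ⟨by exact_mod_cast hm2, ?_, by simp⟩
        have : i.minFac < n := by nlinarith
        exact_mod_cast this
      · exact_mod_cast hsq
      · exact_mod_cast h
      · exact_mod_cast hmd
    rw [if_pos ⟨hcond, h⟩]
    simp [hp]

-- running tally of A's accumulation over the flattened grid
def tally (c : Int) : List Int → Int
  | [] => 0
  | v :: vs => (if is_prime v || is_prime c then v else 0) + tally (c + 1) vs

lemma A_foldl_tally (flat : List Int) (t c : Int) :
    (flat.foldl
      (fun (st : Int × Int) v =>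
        ((if is_prime v || is_prime st.2 then st.1 + v else st.1), st.2 + 1)) (t, c)).1 =
      t + tally c flat := by
  induction flat generalizing t c with
  | nil => simp [tally]
  | cons v vs ih =>
    simp only [List.foldl_cons, tally, ih]
    split_ifs <;> ring

lemma B_sum_tally (s : List Bool) (flat : List Int) (c : Nat)
    (hs : ∀ k : Nat, c ≤ k → k < c + flat.length →
      PySem.List.pyGetD s (k : Int) false = is_prime (k : Int)) :
    (((PySem.List.enumerate flat (c : Int)).filter
        (fun iv => PySem.List.pyGetD s iv.1 false || value_is_prime iv.2)).map
      (fun iv => iv.2)).sum = tally (c : Int) flat := by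
  induction flat generalizing c with
  | nil => simp [PySem.List.enumerate, tally]
  | cons v vs ih =>
    have hcast : ((c : Int) + 1) = (((c + 1 : Nat) : Nat) : Int) := by push_cast; ring
    have hhead : PySem.List.pyGetD s (c : Int) false = is_prime (c : Int) :=
      hs c le_rfl (by simp)
    have htail := ih (c + 1) (fun k hk1 hk2 => hs k (by omega) (by simp at hk2 ⊢; omega))
    simp only [PySem.List.enumerate, hcast, List.filter_cons, tally]
    rw [hhead, value_is_prime_eq, Bool.or_comm]
    by_cases hcond : (is_prime v || is_prime (c : Int)) = true
    · rw [if_pos hcond, List.map_cons, List.sum_cons, htail, if_pos hcond]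
    · rw [if_neg hcond, htail, if_neg hcond, zero_add]

-- ===== VERDICT (by name: the statement is the Claim_ definition above) =====
theorem sum_of_prime_values_or_prime_indexes_spec : Claim_equal_sum_of_prime_values_or_prime_indexes := by
  intro xs _
  unfold Spec_sum_of_prime_values_or_prime_indexes
  have hs : ∀ k : Nat, 0 ≤ k → k < 0 + (xs.flatMap (fun row => row)).length →
      PySem.List.pyGetD (mkSieve (((xs.flatMap (fun row => row)).length : Nat) : Int)) (k : Int) false =
        is_prime (k : Int) := by
    intro k _ hk
    rw [PySem.List.pyGetD_natCast, is_prime_natCast]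
    have hg := mkSieve_get (xs.flatMap (fun row => row)).length k (by omega)
    rw [List.getD_eq_getElem?_getD, hg, Option.getD_some]
  have hB := B_sum_tally (mkSieve (((xs.flatMap (fun row => row)).length : Nat) : Int))
      (xs.flatMap (fun row => row)) 0 hs
  rw [Nat.cast_zero] at hB
  have halt : sum_of_prime_values_or_prime_indexes_alt xs =
      (((PySem.List.enumerate (xs.flatMap (fun row => row))).filter
        (fun iv => PySem.List.pyGetD
            (mkSieve (((xs.flatMap (fun row => row)).length : Nat) : Int)) iv.1 false ||
          value_is_prime iv.2)).map (fun iv => iv.2)).sum := rfl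
  have hAfold : sum_of_prime_values_or_prime_indexes xs =
      ((xs.flatMap (fun row => row)).foldl
        (fun (st : Int × Int) v =>
          ((if is_prime v || is_prime st.2 then st.1 + v else st.1), st.2 + 1)) (0, 0)).1 := by
    unfold sum_of_prime_values_or_prime_indexes
    rw [List.foldl_flatMap]
  rw [hAfold, A_foldl_tally, halt, hB, zero_add]
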